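-- pv_equiv track=rewrite | github.com/huongd17at089/ctdl-gt_2021 | test2.py | xu_ly
-- ===== SOURCE A (Python) =====
-- def sinh(n, k, a):
--     j = k
--     while(j > 0 and int(a[j]) == n-k+j):
--         j -= 1
--     if(j == 0):
--         return True
--     a[j] += 1
--     for i in range(j+1, k +1):
--         a[i] = a[i-1] + 1
--     return False
--
-- def xu_ly(n, k, s):
--     dem = 0
--     xau = [i for i in range(0, k+1)]
--     dung = False
--     while( not dung):
--         # xuat(xau)
--         if(sum(xau) == s):
--             dem += 1
--         # kq = kq + "".join(str(xau[i]) for i in  range(1, len(xau))) + " "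
--         dung = sinh(n, k, xau)
--     return dem
-- ===== SOURCE B (Python) =====
-- def xu_ly(n, k, s):
--     # recursive backtracking over increasing choices, carrying the remaining target sum
--     def cnt(lo, j, t):
--         if j == 0:
--             return 1 if t == 0 else 0
--         total = 0
--         for x in range(lo, n - j + 2):
--             total += cnt(x + 1, j - 1, t - x)
--         return total
--     return cnt(1, k, s)
-- ===== Notes on version B (the rewrite author's own statement) =====
-- stated objective: alternative
-- what changed: A enumerates all k-combinations of 1..n with an explicit array and a 'compute the lexicographic successor' subroutine, re-summing the whole array at each step; B counts them by recursive backtracking over increasing choices, carrying the remaining target sum downward, so no successor scan and no per-combination re-summation happen.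
import Mathlib
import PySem

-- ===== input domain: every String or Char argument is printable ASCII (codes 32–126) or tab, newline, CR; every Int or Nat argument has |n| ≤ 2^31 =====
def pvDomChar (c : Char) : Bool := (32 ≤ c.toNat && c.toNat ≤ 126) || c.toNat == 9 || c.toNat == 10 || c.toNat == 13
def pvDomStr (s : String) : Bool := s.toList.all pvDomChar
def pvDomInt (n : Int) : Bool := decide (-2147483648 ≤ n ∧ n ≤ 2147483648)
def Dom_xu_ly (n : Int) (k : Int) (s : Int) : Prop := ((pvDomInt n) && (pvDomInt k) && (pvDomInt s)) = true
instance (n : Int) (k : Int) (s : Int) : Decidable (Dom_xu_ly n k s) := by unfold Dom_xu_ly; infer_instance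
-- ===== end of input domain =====

-- B replaces A's iterative "advance to the lexicographic successor combination" loop by a recursive
-- backtracking count that carries the remaining target sum (objective: alternative algorithm).
-- A mutates only a local list; no argument is mutated.

-- ===== PORT A =====
-- inner `while j > 0 and int(a[j]) == n-k+j: j -= 1` of sinh; fuel k.toNat suffices (j only decreases,
-- the loop body runs at most k times).  a[j] is read only when 0 < j ≤ k < len(a), always in range in
-- every state the program reaches, so the `pyGet? = some _` test is exact there.
def sinhScan (n k : Int) (a : List Int) : Nat → Int → Int
  | 0, j => j
  | fu + 1, j =>
    if 0 < j ∧ PySem.List.pyGet? a j = some (n - k + j) then sinhScan n k a fu (j - 1) else j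

-- body of sinh's `for i in range(j+1, k+1): a[i] = a[i-1] + 1`, one i
def resetStep (acc : Option (List Int)) (i : Int) : Option (List Int) :=
  match acc with
  | none => none
  | some b =>
    match PySem.List.pyGet? b (i - 1) with
    | none => none
    | some w => PySem.List.pySet? b i (w + 1)

-- one sinh(n, k, a) call: `some (dung, new a)`; `none` = IndexError (a[j] += 1 with j < 0, i.e. k < 0)
def sinhA (n k : Int) (a : List Int) : Option (Bool × List Int) :=
  let j := sinhScan n k a k.toNat k
  if j = 0 then some (true, a)
  else
    match PySem.List.pyGet? a j with
    | none => none
    | some v =>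
      match PySem.List.pySet? a j (v + 1) with
      | none => none
      | some a1 =>
        ((PySem.List.pyRange (j + 1) (k + 1) 1).foldl resetStep (some a1)).map
          (fun a2 => (false, a2))

-- `while not dung:` of xu_ly; `none` = IndexError or fuel exhausted (the chosen fuel is proved
-- sufficient on Pre_, where the Python loop terminates)
def loopA (n k s : Int) : Nat → Int → List Int → Option Int
  | 0, _, _ => none
  | fu + 1, dem, a =>
    let dem' := if a.sum = s then dem + 1 else dem
    match sinhA n k a with
    | none => none
    | some (true, _) => some dem'
    | some (false, a') => loopA n k s fu dem' a'

def xu_ly (n : Int) (k : Int) (s : Int) : Int :=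
  (loopA n k s ((n.toNat + 2) ^ (k.toNat + 1)) 0 (PySem.List.pyRange 0 (k + 1) 1)).getD 0

-- ===== PORT B =====
-- cnt(lo, j, t) of Source B; fuel = j.toNat (each call decreases j by one; for j < 0, where the Python
-- recursion would not return, the fuel runs out — those inputs are outside Pre_)
def cntB (n : Int) : Nat → Int → Int → Int → Int
  | fu, lo, j, t =>
    if j = 0 then (if t = 0 then 1 else 0)
    else
      match fu with
      | 0 => 0
      | fu + 1 =>
        (PySem.List.pyRange lo (n - j + 2) 1).foldl
          (fun total x => total + cntB n fu (x + 1) (j - 1) (t - x)) 0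

def xu_ly_alt (n : Int) (k : Int) (s : Int) : Int := cntB n k.toNat 1 k s

-- ===== PRECONDITION & SPEC =====
-- Pre_ = exactly the inputs on which A returns: k < 0 raises IndexError (a[j] += 1 with j = k on the
-- empty list), and 1 ≤ k with n < k makes A's while loop run forever (its stopping test never fires).
def Pre_xu_ly (n : Int) (k : Int) (s : Int) : Prop := k = 0 ∨ (1 ≤ k ∧ k ≤ n)
instance (n : Int) (k : Int) (s : Int) : Decidable (Pre_xu_ly n k s) := by unfold Pre_xu_ly; infer_instance
def pvWitness_xu_ly : Int × Int × Int := (4, 2, 5)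

def Spec_xu_ly (n : Int) (k : Int) (s : Int) (out : Int) : Prop := out = xu_ly_alt n k s
instance (n : Int) (k : Int) (s : Int) (out : Int) : Decidable (Spec_xu_ly n k s out) := by unfold Spec_xu_ly; infer_instance

-- ===== CLAIM (what is proved, stated in full; the proofs are below) =====
def Claim_equal_xu_ly : Prop := ∀ (n : Int) (k : Int) (s : Int), Dom_xu_ly n k s → Pre_xu_ly n k s → Spec_xu_ly n k s (xu_ly n k s)

-- ===== LEMMAS AND PROOFS =====

def firstC (lo : Int) : Nat → List Int
  | 0 => []
  | m + 1 => lo :: firstC (lo + 1) m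

-- every entry of c is at its maximum (entry before a tail of length r is at most n - r)
def isLastC (n : Int) : List Int → Bool
  | [] => true
  | x :: t => (decide (x = n - (t.length : Int))) && isLastC n t

-- the lexicographic successor A's sinh computes
def nextC (n : Int) : List Int → List Int
  | [] => []
  | x :: t => if isLastC n t then (x + 1) :: firstC (x + 2) t.length else x :: nextC n t

theorem firstC_length (lo : Int) (m : Nat) : (firstC lo m).length = m := by
  induction m generalizing lo with
  | zero => rfl
  | succ m ih => simp [firstC, ih]

theorem nextC_length (n : Int) (c : List Int) : (nextC n c).length = c.length := by
  induction c with
  | nil => rfl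
  | cons x t ih =>
    simp only [nextC]
    split
    · simp [firstC_length]
    · simp [ih]
theorem cntB_rec (n lo t : Int) (m : Nat) :
    cntB n (m + 1) lo (↑m + 1) t =
      if lo ≤ n - ↑m then cntB n m (lo + 1) ↑m (t - lo) + cntB n (m + 1) (lo + 1) (↑m + 1) t
      else 0 := by
  have hm : (↑m + 1 - 1 : Int) = ↑m := by omega
  by_cases h : lo ≤ n - ↑m
  · rw [if_pos h, cntB, if_neg (by omega : (↑m + 1 : Int) ≠ 0),
      PySem.List.pyRange_one_cons (by omega : lo < n - (↑m + 1) + 2)]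
    simp only [List.foldl_cons, zero_add, hm]
    rw [PySem.List.foldl_add]
    have : (n - (↑m + 1) + 2 : Int) = n - ↑m + 1 := by ring
    rw [this]
    congr 1
    rw [cntB, if_neg (by omega : (↑m + 1 : Int) ≠ 0)]
    have : (n - (↑m + 1) + 2 : Int) = n - ↑m + 1 := by ring
    rw [this, PySem.List.foldl_add, hm, zero_add]
  · rw [if_neg h, cntB, if_neg (by omega : (↑m + 1 : Int) ≠ 0),
      PySem.List.pyRange_one_eq_nil (by omega)]
    simp
theorem scan_stop (n k : Int) (a : List Int) (fu : Nat) (d : Nat)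
    (hval : PySem.List.pyGet? a (↑d : Int) ≠ some (n - k + ↑d)) :
    sinhScan n k a fu ↑d = ↑d := by
  cases fu with
  | zero => rfl
  | succ fu => rw [sinhScan, if_neg]; rintro ⟨-, h⟩; exact hval h

theorem scan_skip (n k : Int) (a : List Int) :
    ∀ (m fu d : Nat), m ≤ fu →
      (∀ i : Nat, d < i → i ≤ d + m → PySem.List.pyGet? a (↑i : Int) = some (n - k + ↑i)) →
      sinhScan n k a fu (↑(d + m) : Int) = sinhScan n k a (fu - m) ↑d := by
  intro m
  induction m with
  | zero => intro fu d _ _; simp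
  | succ m ih =>
    intro fu d hfu hmax
    obtain ⟨fu', rfl⟩ : ∃ fu', fu = fu' + 1 := ⟨fu - 1, by omega⟩
    rw [sinhScan, if_pos ⟨by positivity, hmax (d + m + 1) (by omega) (by omega)⟩]
    have h1 : ((d + (m + 1) : Nat) : Int) - 1 = ((d + m : Nat) : Int) := by push_cast; ring
    rw [h1, ih fu' d (by omega) (fun i h1 h2 => hmax i h1 (by omega))]
    congr 1
    omega

theorem isLast_getElem (n : Int) : ∀ (q : List Int), isLastC n q = true →
    ∀ (i : Nat) (h : i < q.length), q[i] = n - ↑q.length + ↑i + 1 := by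
  intro q
  induction q with
  | nil => intro _ i h; simp at h
  | cons x t ih =>
    intro hl i h
    rw [isLastC, Bool.and_eq_true, decide_eq_true_eq] at hl
    cases i with
    | zero => simp only [List.getElem_cons_zero, hl.1, List.length_cons]; push_cast; ring
    | succ i =>
      have := ih hl.2 i (by simpa using h)
      simp only [List.getElem_cons_succ, this, List.length_cons]
      push_cast; ring

theorem isLast_false_mid (n y : Int) (q : List Int) (hy : y ≠ n - ↑q.length) :
    ∀ (p : List Int), isLastC n (p ++ y :: q) = false := by
  intro p
  induction p with
  | nil => simp [isLastC, hy]
  | cons x p' ih => simp [isLastC, ih]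

theorem decompC (n : Int) : ∀ (c : List Int), isLastC n c = true ∨
    ∃ p y q, c = p ++ y :: q ∧ isLastC n q = true ∧ y ≠ n - ↑q.length := by
  intro c
  induction c with
  | nil => left; rfl
  | cons x t ih =>
    rcases ih with hl | ⟨p, y, q, rfl, hq, hy⟩
    · by_cases hx : x = n - (↑t.length : Int)
      · left; simp [isLastC, hx, hl]
      · right; exact ⟨[], x, t, rfl, hl, hx⟩
    · right; exact ⟨x :: p, y, q, rfl, hq, hy⟩

theorem nextC_mid (n y : Int) (q : List Int) (hy : y ≠ n - ↑q.length) (hq : isLastC n q = true) :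
    ∀ (p : List Int), nextC n (p ++ y :: q) = p ++ (y + 1) :: firstC (y + 2) q.length := by
  intro p
  induction p with
  | nil => simp [nextC, hq]
  | cons x p' ih => simp [nextC, isLast_false_mid n y q hy p', ih]

theorem reset_fold : ∀ (v u : List Int) (w : Int),
    (PySem.List.pyRange (↑u.length + 1) (↑u.length + 1 + ↑v.length) 1).foldl resetStep
        (some (u ++ w :: v)) = some (u ++ w :: firstC (w + 1) v.length) := by
  intro v
  induction v with
  | nil => intro u w; simp [PySem.List.pyRange_one_eq_nil, firstC]
  | cons z v' ih =>
    intro u w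
    rw [PySem.List.pyRange_one_cons (by push_cast [List.length_cons]; omega)]
    simp only [List.foldl_cons]
    have hstep : resetStep (some (u ++ w :: z :: v')) (↑u.length + 1) =
        some ((u ++ [w]) ++ (w + 1) :: v') := by
      rw [resetStep]
      have h1 : (↑u.length + 1 - 1 : Int) = ↑u.length := by ring
      rw [h1, PySem.List.pyGet?_append_length]
      dsimp only
      have h2 : (↑u.length + 1 : Int) = ((u.length + 1 : Nat) : Int) := by push_cast; ring
      rw [h2, PySem.List.pySet?_natCast _ _ _ (by simp)]
      congr 1
      rw [List.set_append]
      simp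
    rw [hstep]
    have h3 : (↑u.length + 1 + ↑(z :: v').length : Int) =
        ↑(u ++ [w]).length + 1 + ↑v'.length := by simp; omega
    have h4 : (↑u.length + 1 + 1 : Int) = ↑(u ++ [w]).length + 1 := by simp
    rw [h3, h4, ih (u ++ [w]) (w + 1)]
    simp [firstC]

theorem sinh_char (n : Int) (cs : List Int) :
    sinhA n (↑cs.length) (0 :: cs) =
      if isLastC n cs then some (true, 0 :: cs) else some (false, 0 :: nextC n cs) := by
  rcases decompC n cs with hl | ⟨p, y, q, rfl, hq, hy⟩
  · rw [if_pos hl, sinhA]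
    have htn : ((cs.length : Int)).toNat = cs.length := Int.toNat_natCast _
    have hvals : ∀ i : Nat, 0 < i → i ≤ 0 + cs.length →
        PySem.List.pyGet? (0 :: cs) (↑i : Int) = some (n - ↑cs.length + ↑i) := by
      intro i h1 h2
      obtain ⟨r, rfl⟩ : ∃ r, i = r + 1 := ⟨i - 1, by omega⟩
      have hr : r < cs.length := by omega
      have hh : PySem.List.pyGet? (0 :: cs) ((r + 1 : Nat) : Int) = (cs[r]?) := by
        rw [PySem.List.pyGet?_natCast]; simp
      rw [hh, List.getElem?_eq_getElem hr, isLast_getElem n cs hl r hr]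
      congr 1
      push_cast; ring
    have hscan : sinhScan n ↑cs.length (0 :: cs) cs.length ↑cs.length = 0 := by
      have hs := scan_skip n ↑cs.length (0 :: cs) cs.length cs.length 0 (le_refl _) hvals
      simpa using hs
    rw [htn, hscan, if_pos rfl]
  · have hlen : (p ++ y :: q).length = p.length + 1 + q.length := by simp; omega
    have hfalse := isLast_false_mid n y q hy p
    rw [if_neg (by simp [hfalse])]
    rw [sinhA]
    simp only [hlen, Int.toNat_natCast]
    have hgety : PySem.List.pyGet? (0 :: (p ++ y :: q)) ((p.length + 1 : Nat) : Int) = some y := by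
      have h0 : (0 :: (p ++ y :: q)) = (0 :: p) ++ y :: q := by simp
      rw [h0]
      have h1 : ((p.length + 1 : Nat) : Int) = ((0 :: p).length : Int) := by simp
      rw [h1, PySem.List.pyGet?_append_length]
    have hvals : ∀ i : Nat, p.length + 1 < i → i ≤ (p.length + 1) + q.length →
        PySem.List.pyGet? (0 :: (p ++ y :: q)) (↑i : Int) =
          some (n - ((p.length + 1 + q.length : Nat) : Int) + ↑i) := by
      intro i h1 h2
      obtain ⟨r, hr⟩ : ∃ r, i = p.length + 2 + r := ⟨i - p.length - 2, by omega⟩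
      have hrq : r < q.length := by omega
      subst hr
      have hidx : PySem.List.pyGet? (0 :: (p ++ y :: q)) ((p.length + 2 + r : Nat) : Int) =
          ((p ++ y :: q)[p.length + 1 + r]?) := by
        rw [PySem.List.pyGet?_natCast]
        have hh : p.length + 2 + r = (p.length + 1 + r) + 1 := by omega
        rw [hh]; simp
      rw [hidx]
      have hget : ((p ++ y :: q)[p.length + 1 + r]?) = (q[r]?) := by
        rw [List.getElem?_append_right (by omega)]
        have hh : p.length + 1 + r - p.length = r + 1 := by omega
        rw [hh]; simp
      rw [hget, List.getElem?_eq_getElem hrq, isLast_getElem n q hq r hrq]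
      congr 1
      push_cast; ring
    have hscan : sinhScan n ((p.length + 1 + q.length : Nat) : Int) (0 :: (p ++ y :: q))
        (p.length + 1 + q.length) ((p.length + 1 + q.length : Nat) : Int) =
          ((p.length + 1 : Nat) : Int) := by
      have hskip := scan_skip n ((p.length + 1 + q.length : Nat) : Int) (0 :: (p ++ y :: q))
        q.length (p.length + 1 + q.length) (p.length + 1) (by omega) hvals
      rw [hskip]
      have hfu : p.length + 1 + q.length - q.length = p.length + 1 := by omega
      rw [hfu]
      refine scan_stop n _ _ _ (p.length + 1) ?_
      rw [hgety]
      intro hcon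
      apply hy
      have hc2 := Option.some.inj hcon
      push_cast at hc2 ⊢
      omega
    rw [hscan, if_neg (by push_cast; omega), hgety]
    dsimp only
    have hset : PySem.List.pySet? (0 :: (p ++ y :: q)) ((p.length + 1 : Nat) : Int) (y + 1) =
        some ((0 :: p) ++ (y + 1) :: q) := by
      have h0 : (0 :: (p ++ y :: q)) = (0 :: p) ++ y :: q := by simp
      have h1 : ((p.length + 1 : Nat) : Int) = (((0 :: p).length : Nat) : Int) := by simp
      rw [h0, h1, PySem.List.pySet?_natCast _ _ _ (by simp)]
      rw [List.set_append]
      simp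
    rw [hset]
    have hrange : PySem.List.pyRange (((p.length + 1 : Nat) : Int) + 1)
        (((p.length + 1 + q.length : Nat) : Int) + 1) 1 =
        PySem.List.pyRange (↑((0 :: p) : List Int).length + 1)
          (↑((0 :: p) : List Int).length + 1 + ↑q.length) 1 := by
      congr 1 <;> (simp; push_cast; ring)
    rw [hrange]
    dsimp only
    rw [reset_fold q (0 :: p) (y + 1)]
    rw [nextC_mid n y q hy hq p]
    have h21 : (y + 1 + 1 : Int) = y + 2 := by ring
    simp [h21]

theorem sinh_char' (n x : Int) (t : List Int) :
    sinhA n (↑t.length + 1) (0 :: x :: t) =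
      if isLastC n (x :: t) then some (true, 0 :: x :: t)
      else some (false, 0 :: nextC n (x :: t)) := by
  have h := sinh_char n (x :: t)
  have hc : ((x :: t).length : Int) = ↑t.length + 1 := by simp
  rwa [hc] at h

theorem loopA_mono (n k s : Int) :
    ∀ (f f' : Nat) (dem : Int) (a : List Int) (v : Int), f ≤ f' →
      loopA n k s f dem a = some v → loopA n k s f' dem a = some v := by
  intro f
  induction f with
  | zero => intro f' dem a v _ h; simp [loopA] at h
  | succ f ih =>
    intro f' dem a v hle h
    obtain ⟨f'', rfl⟩ : ∃ f'', f' = f'' + 1 := ⟨f' - 1, by omega⟩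
    simp only [loopA] at h ⊢
    cases hs : sinhA n k a with
    | none => rw [hs] at h; exact absurd h (by simp)
    | some p =>
      rw [hs] at h
      obtain ⟨b, a'⟩ := p
      cases b with
      | true => exact h
      | false => exact ih f'' _ a' v (by omega) h

theorem sim_last (n s : Int) :
    ∀ (f : Nat) (t : List Int) (x dem v : Int), x = n - (↑t.length : Int) →
      loopA n (↑t.length) (s - x) f dem (0 :: t) = some v →
      loopA n (↑t.length + 1) s f dem (0 :: x :: t) = some v := by
  intro f
  induction f with
  | zero => intro t x dem v _ h; simp [loopA] at h
  | succ f ih =>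
    intro t x dem v hx h
    rw [loopA] at h ⊢
    rw [sinh_char n t] at h
    rw [sinh_char' n x t]
    have hdem : (if (0 :: x :: t).sum = s then dem + 1 else dem) =
        (if (0 :: t).sum = s - x then dem + 1 else dem) := by
      simp only [List.sum_cons]
      by_cases hsum : 0 + t.sum = s - x
      · rw [if_pos hsum, if_pos (by omega)]
      · rw [if_neg hsum, if_neg (by omega)]
    by_cases hL : isLastC n t
    · rw [if_pos hL] at h
      rw [if_pos (by simp [isLastC, hL, hx])]
      dsimp only at h ⊢
      rw [hdem]
      exact h
    · rw [if_neg hL] at h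
      rw [if_neg (by simp [isLastC, hL]), nextC, if_neg hL]
      dsimp only at h ⊢
      rw [hdem]
      have hx' : x = n - (↑(nextC n t).length : Int) := by rw [nextC_length]; exact hx
      have := ih (nextC n t) x _ v hx' (by rw [nextC_length]; exact h)
      rw [nextC_length] at this
      exact this

theorem sim_step (n s : Int) :
    ∀ (f : Nat) (t : List Int) (x dem v : Int), x ≠ n - (↑t.length : Int) →
      loopA n (↑t.length) (s - x) f dem (0 :: t) = some v →
      ∀ (g : Nat) (w : Int),
        loopA n (↑t.length + 1) s g v (0 :: firstC (x + 1) (t.length + 1)) = some w →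
        loopA n (↑t.length + 1) s (f + g) dem (0 :: x :: t) = some w := by
  intro f
  induction f with
  | zero => intro t x dem v _ h; simp [loopA] at h
  | succ f ih =>
    intro t x dem v hx h g w hcont
    rw [loopA] at h
    rw [sinh_char n t] at h
    have hfg : f + 1 + g = (f + g) + 1 := by omega
    rw [hfg, loopA, sinh_char' n x t]
    have hdem : (if (0 :: x :: t).sum = s then dem + 1 else dem) =
        (if (0 :: t).sum = s - x then dem + 1 else dem) := by
      simp only [List.sum_cons]
      by_cases hsum : 0 + t.sum = s - x
      · rw [if_pos hsum, if_pos (by omega)]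
      · rw [if_neg hsum, if_neg (by omega)]
    by_cases hL : isLastC n t
    · rw [if_pos hL] at h
      dsimp only at h
      rw [if_neg (by simp [isLastC, hL, hx]), nextC, if_pos hL]
      dsimp only
      rw [hdem]
      have hveq : (if (0 :: t).sum = s - x then dem + 1 else dem) = v := Option.some.inj h
      rw [hveq]
      have hfirst : firstC (x + 1) (t.length + 1) = (x + 1) :: firstC (x + 1 + 1) t.length := rfl
      rw [hfirst] at hcont
      have h21 : (x + 1 + 1 : Int) = x + 2 := by ring
      rw [h21] at hcont
      exact loopA_mono n _ s g (f + g) _ _ w (by omega) hcont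
    · rw [if_neg hL] at h
      dsimp only at h
      rw [if_neg (by simp [isLastC, hL]), nextC, if_neg hL]
      dsimp only
      rw [hdem]
      have hx' : x ≠ n - (↑(nextC n t).length : Int) := by rw [nextC_length]; exact hx
      have := ih (nextC n t) x _ v hx' (by rw [nextC_length]; exact h) g w
        (by rw [nextC_length]; exact hcont)
      rw [nextC_length] at this
      exact this

theorem main_count (n : Int) :
    ∀ (m : Nat) (lo : Int), 0 ≤ lo → (m = 0 ∨ lo + ↑m ≤ n + 1) → ∀ (dem s : Int),
      ∃ f ≤ ((n + 2 - lo).toNat + 1) ^ (m + 1),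
        loopA n (↑m) s f dem (0 :: firstC lo m) = some (dem + cntB n m lo (↑m) s) := by
  intro m
  induction m with
  | zero =>
    intro lo _ _ dem s
    refine ⟨1, by simp, ?_⟩
    rw [loopA]
    have hs := sinh_char n []
    simp only [List.length_nil, Nat.cast_zero, isLastC, if_pos] at hs
    simp only [Nat.cast_zero, firstC, hs]
    rw [cntB]
    simp only [if_pos rfl]
    congr 1
    simp only [List.sum_cons, List.sum_nil, add_zero]
    split_ifs <;> omega
  | succ m ihm =>
    have KEY : ∀ (D : Nat) (lo : Int), (n + 1 - lo).toNat ≤ D → 0 ≤ lo →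
        lo + (↑(m + 1) : Int) ≤ n + 1 → ∀ dem s,
        ∃ f ≤ ((n + 2 - lo).toNat + 1) ^ (m + 2),
          loopA n (↑(m + 1)) s f dem (0 :: firstC lo (m + 1)) =
            some (dem + cntB n (m + 1) lo (↑(m + 1)) s) := by
      intro D
      induction D with
      | zero => intro lo hD hlo hcond; exfalso; push_cast at hcond; omega
      | succ D ihd =>
        intro lo hD hlo hcond dem s
        have hle : lo ≤ n - (↑m : Int) := by push_cast at hcond; omega
        obtain ⟨f₁, hf₁, hrun⟩ := ihm (lo + 1) (by omega)
          (by right; push_cast at hcond ⊢; omega) dem (s - lo)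
        have htl : (firstC (lo + 1) m).length = m := firstC_length _ _
        have hcast1 : ((m : Nat) : Int) + 1 = ((m + 1 : Nat) : Int) := by push_cast; ring
        have hfirst : firstC lo (m + 1) = lo :: firstC (lo + 1) m := rfl
        by_cases hmax : lo = n - (↑m : Int)
        · -- head at its maximum: the run on the tail is the whole run
          have hbig := sim_last n s f₁ (firstC (lo + 1) m) lo dem _
            (by rw [htl]; exact hmax) (by rw [htl]; exact hrun)
          rw [htl, hcast1] at hbig
          refine ⟨f₁, ?_, ?_⟩
          · calc f₁ ≤ ((n + 2 - (lo + 1)).toNat + 1) ^ (m + 1) := hf₁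
              _ ≤ ((n + 2 - lo).toNat + 1) ^ (m + 1) :=
                  Nat.pow_le_pow_left (by omega) _
              _ ≤ ((n + 2 - lo).toNat + 1) ^ (m + 2) :=
                  Nat.pow_le_pow_right (by omega) (by omega)
          · have hval : dem + cntB n m (lo + 1) (↑m : Int) (s - lo) =
                dem + cntB n (m + 1) lo (↑(m + 1) : Int) s := by
              rw [← hcast1, cntB_rec n lo s m, if_pos hle,
                cntB_rec n (lo + 1) s m, if_neg (by omega)]
              ring
            rw [hfirst, hbig, hval]
        · -- head below its maximum: continue from the first combination with head lo + 1
          have hlt : lo < n - (↑m : Int) := lt_of_le_of_ne hle hmax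
          obtain ⟨g, hg, hcont⟩ := ihd (lo + 1) (by omega) (by omega)
            (by push_cast; omega) (dem + cntB n m (lo + 1) (↑m) (s - lo)) s
          have hbig := sim_step n s f₁ (firstC (lo + 1) m) lo dem _
            (by rw [htl]; exact hmax) (by rw [htl]; exact hrun) g _
            (by rw [htl, hcast1]; exact hcont)
          rw [htl, hcast1] at hbig
          refine ⟨f₁ + g, ?_, ?_⟩
          · have e1 : (n + 2 - (lo + 1)).toNat = (n + 1 - lo).toNat := by omega
            have e2 : (n + 2 - lo).toNat = (n + 1 - lo).toNat + 1 := by omega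
            rw [e1] at hf₁ hg
            rw [e2]
            set C := (n + 1 - lo).toNat + 1 with hC
            calc f₁ + g ≤ C ^ (m + 1) + C ^ (m + 2) := Nat.add_le_add hf₁ hg
              _ = C ^ (m + 1) * (C + 1) := by ring
              _ ≤ (C + 1) ^ (m + 1) * (C + 1) :=
                  Nat.mul_le_mul_right _ (Nat.pow_le_pow_left (by omega) _)
              _ = (C + 1) ^ (m + 2) := by ring
          · have hval : dem + cntB n m (lo + 1) (↑m : Int) (s - lo) +
                cntB n (m + 1) (lo + 1) (↑(m + 1) : Int) s =
                dem + cntB n (m + 1) lo (↑(m + 1) : Int) s := by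
              rw [← hcast1, cntB_rec n lo s m, if_pos hle]
              ring
            rw [hfirst, hbig, hval]
    intro lo hlo hcond dem s
    exact KEY _ lo le_rfl hlo (hcond.resolve_left (by omega)) dem s

theorem pyRange_firstC : ∀ (m : Nat) (a : Int), PySem.List.pyRange a (a + ↑m) 1 = firstC a m := by
  intro m
  induction m with
  | zero => intro a; simp [PySem.List.pyRange_one_eq_nil, firstC]
  | succ m ih =>
    intro a
    rw [PySem.List.pyRange_one_cons (by push_cast; omega), firstC]
    have h1 : (a + ↑(m + 1) : Int) = (a + 1) + ↑m := by push_cast; ring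
    rw [h1, ih]

theorem xu_ly_spec' : ∀ (n k s : Int), (k = 0 ∨ (1 ≤ k ∧ k ≤ n)) →
    xu_ly n k s = xu_ly_alt n k s := by
  intro n k s hpre
  have hk0 : 0 ≤ k := by rcases hpre with h | h <;> omega
  have hkm : ((k.toNat : Nat) : Int) = k := Int.toNat_of_nonneg hk0
  have hinit : PySem.List.pyRange 0 (k + 1) 1 = 0 :: firstC 1 k.toNat := by
    have h1 : (k + 1 : Int) = 0 + ((k.toNat + 1 : Nat) : Int) := by push_cast; omega
    rw [h1, pyRange_firstC (k.toNat + 1) 0]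
    rfl
  obtain ⟨f, hf, hrun⟩ := main_count n k.toNat 1 (by omega)
    (by rcases hpre with h | h
        · left; omega
        · right; push_cast; omega) 0 s
  have hfuel : f ≤ (n.toNat + 2) ^ (k.toNat + 1) := by
    calc f ≤ ((n + 2 - 1).toNat + 1) ^ (k.toNat + 1) := hf
      _ ≤ (n.toNat + 2) ^ (k.toNat + 1) := Nat.pow_le_pow_left (by omega) _
  have hbig := loopA_mono n (↑k.toNat) s f ((n.toNat + 2) ^ (k.toNat + 1)) 0 _ _ hfuel hrun
  rw [hkm] at hbig
  rw [xu_ly, hinit, hbig, xu_ly_alt]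
  simp


-- ===== VERDICT (by name: the statement is the Claim_ definition above) =====
theorem xu_ly_spec : Claim_equal_xu_ly := by
  unfold Claim_equal_xu_ly Spec_xu_ly
  intro n k s _ hpre
  exact xu_ly_spec' n k s hpre
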